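-- pv_equiv track=rewrite | github.com/Mattrizzle/palette-reformatter | palette_reformatter_shared.py | build_file_type_choice_list
-- ===== SOURCE A (Python) =====
-- formats = [
-- #	Short Name	Input type?	Output type?	Index Size	Content Type	Length Type	Byte Order
-- 	["32x",		True,		True,		2,		"raw",		"variable",	"big"],
-- 	["act",		True,		True,		3,		"raw",		"fixed",	"big"],
-- 	["amp",		True,		True,		1,		"raw",		"fixed",	"big"],
-- 	["bmp24",	True,		True,		3,		"image",	"fixed",	"big"],
-- 	["col",		True,		True,		2,		"headered-raw",	"fixed",	"little"],
-- 	["gen",		True,		True,		2,		"raw",		"variable",	"big"],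
-- 	["gg",		True,		True,		2,		"raw",		"variable",	"little"],
-- 	["gpl",		True,		True,		1,		"text",		"variable",	"big"],		# Index size is in lines rather than bytes, as GIMP palettes are text-based
-- 	["gs0",		True,		False,		2,		"raw",		"fixed",	"big"],
-- 	["jasc",	True,		True,		1,		"text",		"variable",	"big"],		# Index size is in lines rather than bytes, as JASC palettes are text-based
-- 	["pdn",		True,		True,		1,		"text",		"fixed",	"big"],		# Index size is in lines rather than bytes, as Paint.NET palettes are text-based
-- 	["png8",	True,		True,		3,		"image",	"fixed",	"big"],
-- 	["png24",	True,		True,		3,		"image",	"variable",	"big"],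
-- 	["rgb15",	True,		True,		2,		"raw",		"variable",	"little"],
-- 	["rgb18",	True,		True,		3,		"raw",		"variable",	"big"],
-- 	["riff",	True,		True,		4,		"headered-raw",	"fixed",	"big"],
-- 	["sms",		True,		True,		1,		"raw",		"variable",	"little"],
-- 	["snes",	True,		True,		2,		"raw",		"variable",	"little"],
-- 	["tpl15",	True,		True,		2,		"headered-raw",	"fixed",	"little"],
-- 	["tpl24",	True,		True,		3,		"headered-raw",	"fixed",	"big"],
-- 	["wsc",		True,		True,		2,		"raw",		"variable",	"little"],
-- 	["zst",		True,		False,		2,		"raw",		"fixed",	"little"]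
-- ]
--
-- format_aliases = [
-- #	Alias		Type Name
-- 	["gba",		"snes"],
-- 	["gbc",		"snes"],
-- 	["md",		"gen"],
-- 	["psx",		"snes"],
-- 	["rgb24",	"act"]
-- ]
--
-- def find_in_list(value_to_search, list_to_search):
-- 	for x in range(0, len(list_to_search)):
-- 		try:
-- 			pos = list_to_search[x].index(value_to_search)
-- 			return [x, pos]
-- 		except:
-- 			continue
-- 	return [False, False]  # whatever one wants to get if value not found
--
-- def build_file_type_choice_list(is_input = None, is_output = None, content_type = None, length_type = None):
-- 	choice_list = []
--
-- 	for x in formats: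
-- 		if content_type != None and x[4] != content_type:
-- 			continue
-- 		elif length_type != None and x[5] != length_type:
-- 			continue
-- 		elif is_input != None and x[1] != is_input:
-- 			continue
-- 		elif is_output != None and x[2] != is_output:
-- 			continue
-- 		else:
-- 			choice_list.append(x[0])
--
-- 	for x in format_aliases:
-- 		resolved_type_id = find_in_list(x[1], formats)[0]
-- 		resolved_is_input = formats[resolved_type_id][1]
-- 		resolved_is_output = formats[resolved_type_id][2]
-- 		resolved_content_type = formats[resolved_type_id][4]
-- 		resolved_length_type = formats[resolved_type_id][5]
--
-- 		if content_type != None and resolved_content_type != content_type: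
-- 			continue
-- 		elif length_type != None and resolved_length_type != length_type:
-- 			continue
-- 		elif is_input != None and resolved_is_input != is_input:
-- 			continue
-- 		elif is_output != None and resolved_is_output != is_output:
-- 			continue
-- 		else:
-- 			choice_list.append(x[0])
--
-- 	return choice_list
-- ===== SOURCE B (Python) =====
-- # B: inverted-index query — value->name-set indexes built once over a unified
-- # candidate table, answer = intersection of the index sets for the supplied
-- # filters, emitted in table order via a position-keyed sort.
--
-- formats = [
-- 	["32x",		True,	True,	2,	"raw",		"variable",	"big"],
-- 	["act",		True,	True,	3,	"raw",		"fixed",	"big"],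
-- 	["amp",		True,	True,	1,	"raw",		"fixed",	"big"],
-- 	["bmp24",	True,	True,	3,	"image",	"fixed",	"big"],
-- 	["col",		True,	True,	2,	"headered-raw",	"fixed",	"little"],
-- 	["gen",		True,	True,	2,	"raw",		"variable",	"big"],
-- 	["gg",		True,	True,	2,	"raw",		"variable",	"little"],
-- 	["gpl",		True,	True,	1,	"text",		"variable",	"big"],
-- 	["gs0",		True,	False,	2,	"raw",		"fixed",	"big"],
-- 	["jasc",	True,	True,	1,	"text",		"variable",	"big"],
-- 	["pdn",		True,	True,	1,	"text",		"fixed",	"big"],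
-- 	["png8",	True,	True,	3,	"image",	"fixed",	"big"],
-- 	["png24",	True,	True,	3,	"image",	"variable",	"big"],
-- 	["rgb15",	True,	True,	2,	"raw",		"variable",	"little"],
-- 	["rgb18",	True,	True,	3,	"raw",		"variable",	"big"],
-- 	["riff",	True,	True,	4,	"headered-raw",	"fixed",	"big"],
-- 	["sms",		True,	True,	1,	"raw",		"variable",	"little"],
-- 	["snes",	True,	True,	2,	"raw",		"variable",	"little"],
-- 	["tpl15",	True,	True,	2,	"headered-raw",	"fixed",	"little"],
-- 	["tpl24",	True,	True,	3,	"headered-raw",	"fixed",	"big"],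
-- 	["wsc",		True,	True,	2,	"raw",		"variable",	"little"],
-- 	["zst",		True,	False,	2,	"raw",		"fixed",	"little"]
-- ]
--
-- format_aliases = [
-- 	["gba",		"snes"],
-- 	["gbc",		"snes"],
-- 	["md",		"gen"],
-- 	["psx",		"snes"],
-- 	["rgb24",	"act"]
-- ]
--
-- # unified candidate table in output order: formats, then aliases with the
-- # target's attributes resolved by name (names are unique, so this is safe)
-- _by_name = {f[0]: (f[1], f[2], f[4], f[5]) for f in formats}
-- _table = [(f[0], _by_name[f[0]]) for f in formats] + \
--          [(alias, _by_name[target]) for alias, target in format_aliases]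
-- _pos = {name: k for k, (name, _) in enumerate(_table)}
-- # inverted indexes, built once: attribute value -> set of candidate names carrying it
-- _index = ({}, {}, {}, {})
-- for _name, _attrs in _table:
-- 	for _j, _v in enumerate(_attrs):
-- 		_index[_j].setdefault(_v, set()).add(_name)
--
-- def build_file_type_choice_list(is_input = None, is_output = None, content_type = None, length_type = None):
-- 	# intersect the index sets of the supplied filters, emit hits in table order
-- 	hits = set(_pos)
-- 	for j, want in enumerate((is_input, is_output, content_type, length_type)):
-- 		if want is not None:
-- 			hits &= _index[j].get(want, set())
-- 	return sorted(hits, key=_pos.__getitem__)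
-- ===== Notes on version B (the rewrite author's own statement) =====
-- stated objective: alternative
-- what changed: A's two predicate-filter loops (the alias loop rescanning the formats table with find_in_list/.index per alias) are replaced by an inverted-index query: value-to-name-set indexes for the four attributes are built once over a unified resolved candidate table, the answer is the intersection of the index sets of the supplied filters, emitted in table order by a position-keyed sort.
import Mathlib
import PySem

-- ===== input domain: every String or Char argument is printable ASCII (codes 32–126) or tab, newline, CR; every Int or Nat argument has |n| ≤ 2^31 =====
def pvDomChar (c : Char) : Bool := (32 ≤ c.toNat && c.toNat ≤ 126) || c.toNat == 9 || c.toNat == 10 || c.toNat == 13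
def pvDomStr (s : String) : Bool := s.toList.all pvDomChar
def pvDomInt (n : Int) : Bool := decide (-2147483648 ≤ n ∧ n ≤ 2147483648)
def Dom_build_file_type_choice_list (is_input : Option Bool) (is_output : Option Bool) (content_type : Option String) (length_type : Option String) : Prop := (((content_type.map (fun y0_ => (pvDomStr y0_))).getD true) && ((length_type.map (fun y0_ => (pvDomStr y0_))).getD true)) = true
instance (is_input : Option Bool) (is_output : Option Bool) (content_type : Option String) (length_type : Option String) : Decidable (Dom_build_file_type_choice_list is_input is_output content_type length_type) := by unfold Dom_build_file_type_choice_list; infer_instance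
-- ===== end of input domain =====

-- B answers the query by inverted indexes (attribute value → name set) built once over a
-- unified candidate table, intersecting the index sets of the supplied filters and emitting
-- the hits in table order, instead of A's two predicate-filter loops with per-alias rescans.

-- ===== PORT A =====

-- Python value in a heterogeneous table row (str / bool / int)
inductive PyObj where
  | S : String → PyObj
  | B : Bool → PyObj
  | I : Int → PyObj
deriving DecidableEq, Repr

-- the module-level `formats` table, rows as Python lists of mixed values
def pyFormats : List (List PyObj) :=
  [[.S "32x", .B true, .B true, .I 2, .S "raw", .S "variable", .S "big"],
   [.S "act", .B true, .B true, .I 3, .S "raw", .S "fixed", .S "big"],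
   [.S "amp", .B true, .B true, .I 1, .S "raw", .S "fixed", .S "big"],
   [.S "bmp24", .B true, .B true, .I 3, .S "image", .S "fixed", .S "big"],
   [.S "col", .B true, .B true, .I 2, .S "headered-raw", .S "fixed", .S "little"],
   [.S "gen", .B true, .B true, .I 2, .S "raw", .S "variable", .S "big"],
   [.S "gg", .B true, .B true, .I 2, .S "raw", .S "variable", .S "little"],
   [.S "gpl", .B true, .B true, .I 1, .S "text", .S "variable", .S "big"],
   [.S "gs0", .B true, .B false, .I 2, .S "raw", .S "fixed", .S "big"],
   [.S "jasc", .B true, .B true, .I 1, .S "text", .S "variable", .S "big"],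
   [.S "pdn", .B true, .B true, .I 1, .S "text", .S "fixed", .S "big"],
   [.S "png8", .B true, .B true, .I 3, .S "image", .S "fixed", .S "big"],
   [.S "png24", .B true, .B true, .I 3, .S "image", .S "variable", .S "big"],
   [.S "rgb15", .B true, .B true, .I 2, .S "raw", .S "variable", .S "little"],
   [.S "rgb18", .B true, .B true, .I 3, .S "raw", .S "variable", .S "big"],
   [.S "riff", .B true, .B true, .I 4, .S "headered-raw", .S "fixed", .S "big"],
   [.S "sms", .B true, .B true, .I 1, .S "raw", .S "variable", .S "little"],
   [.S "snes", .B true, .B true, .I 2, .S "raw", .S "variable", .S "little"],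
   [.S "tpl15", .B true, .B true, .I 2, .S "headered-raw", .S "fixed", .S "little"],
   [.S "tpl24", .B true, .B true, .I 3, .S "headered-raw", .S "fixed", .S "big"],
   [.S "wsc", .B true, .B true, .I 2, .S "raw", .S "variable", .S "little"],
   [.S "zst", .B true, .B false, .I 2, .S "raw", .S "fixed", .S "little"]]

-- the module-level `format_aliases` table
def pyAliases : List (List PyObj) :=
  [[.S "gba", .S "snes"], [.S "gbc", .S "snes"], [.S "md", .S "gen"],
   [.S "psx", .S "snes"], [.S "rgb24", .S "act"]]

-- loop of find_in_list over range(0, len(list_to_search)); the bare `except: continue`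
-- swallows the ValueError of .index (and any indexing error — unreachable, x is in range)
def find_in_list_go (v : PyObj) (l : List (List PyObj)) : List Int → List PyObj
  | [] => [.B false, .B false]
  | x :: rest =>
    match PySem.List.pyGet? l x with
    | some row =>
      match PySem.List.index? row v with
      | some pos => [.I x, .I (pos : Int)]
      | none => find_in_list_go v l rest
    | none => find_in_list_go v l rest

def find_in_list (v : PyObj) (l : List (List PyObj)) : List PyObj :=
  find_in_list_go v l (PySem.List.pyRange 0 (l.length : Int) 1)

-- `lst[i]`: always in range on the concrete tables here, so the default is unreachable
def pyAt (x : List PyObj) (i : Int) : PyObj := (PySem.List.pyGet? x i).getD (.B false)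

-- a PyObj used as a list index: Python treats booleans as 0/1 (the `[False, False]`
-- sentinel of find_in_list); a str index would raise TypeError, unreachable here
def objToIdx : PyObj → Int
  | .I n => n
  | .B b => if b then 1 else 0
  | .S _ => 0

-- `x[0]` of a table row, always a str in these tables
def pyName (x : List PyObj) : String :=
  match PySem.List.pyGet? x 0 with
  | some (.S s) => s
  | _ => ""

-- `w != None and v != w` (the skip test of each elif branch)
def skipS (w : Option String) (v : PyObj) : Bool :=
  match w with
  | some c => v != .S c
  | none => false

def skipB (w : Option Bool) (v : PyObj) : Bool :=
  match w with
  | some b => v != .B b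
  | none => false

def build_file_type_choice_list (is_input : Option Bool) (is_output : Option Bool) (content_type : Option String) (length_type : Option String) : List String :=
  let choice1 := pyFormats.foldl (fun acc x =>
    if skipS content_type (pyAt x 4) then acc
    else if skipS length_type (pyAt x 5) then acc
    else if skipB is_input (pyAt x 1) then acc
    else if skipB is_output (pyAt x 2) then acc
    else acc ++ [pyName x]) []
  pyAliases.foldl (fun acc x =>
    let rid := objToIdx (pyAt (find_in_list (pyAt x 1) pyFormats) 0)
    let row := (PySem.List.pyGet? pyFormats rid).getD []
    if skipS content_type (pyAt row 4) then acc
    else if skipS length_type (pyAt row 5) then acc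
    else if skipB is_input (pyAt row 1) then acc
    else if skipB is_output (pyAt row 2) then acc
    else acc ++ [pyName x]) choice1

-- ===== PORT B =====

-- the same tables, as typed tuples (name, is_input, is_output, index size, content type, length type, byte order)
def altFormats : List (String × Bool × Bool × Int × String × String × String) :=
  [("32x", true, true, 2, "raw", "variable", "big"),
   ("act", true, true, 3, "raw", "fixed", "big"),
   ("amp", true, true, 1, "raw", "fixed", "big"),
   ("bmp24", true, true, 3, "image", "fixed", "big"),
   ("col", true, true, 2, "headered-raw", "fixed", "little"),
   ("gen", true, true, 2, "raw", "variable", "big"),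
   ("gg", true, true, 2, "raw", "variable", "little"),
   ("gpl", true, true, 1, "text", "variable", "big"),
   ("gs0", true, false, 2, "raw", "fixed", "big"),
   ("jasc", true, true, 1, "text", "variable", "big"),
   ("pdn", true, true, 1, "text", "fixed", "big"),
   ("png8", true, true, 3, "image", "fixed", "big"),
   ("png24", true, true, 3, "image", "variable", "big"),
   ("rgb15", true, true, 2, "raw", "variable", "little"),
   ("rgb18", true, true, 3, "raw", "variable", "big"),
   ("riff", true, true, 4, "headered-raw", "fixed", "big"),
   ("sms", true, true, 1, "raw", "variable", "little"),
   ("snes", true, true, 2, "raw", "variable", "little"),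
   ("tpl15", true, true, 2, "headered-raw", "fixed", "little"),
   ("tpl24", true, true, 3, "headered-raw", "fixed", "big"),
   ("wsc", true, true, 2, "raw", "variable", "little"),
   ("zst", true, false, 2, "raw", "fixed", "little")]

def altAliases : List (String × String) :=
  [("gba", "snes"), ("gbc", "snes"), ("md", "gen"), ("psx", "snes"), ("rgb24", "act")]

-- _by_name = {f[0]: (f[1], f[2], f[4], f[5]) for f in formats}
def altByName : PySem.Dict String (Bool × Bool × String × String) :=
  altFormats.foldl (fun d f => d.insert f.1 (f.2.1, f.2.2.1, f.2.2.2.2.1, f.2.2.2.2.2.1)) PySem.Dict.empty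

-- _table: by_name[k] would raise KeyError on a missing key — unreachable here, every
-- looked-up name is a formats name, so the getD default is never used
def altTable : List (String × Bool × Bool × String × String) :=
  altFormats.map (fun f => (f.1, (altByName.get? f.1).getD (false, false, "", "")))
    ++ altAliases.map (fun al => (al.1, (altByName.get? al.2).getD (false, false, "", "")))

-- _pos = {name: k for k, (name, _) in enumerate(_table)}
def altPos : PySem.Dict String Int :=
  (PySem.List.enumerate altTable).foldl (fun d p => d.insert p.2.1 p.1) PySem.Dict.empty

-- the inverted indexes: the inner `for j, v in enumerate(attrs)` over the fixed 4-tuple of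
-- attributes is unrolled into its four iterations (the four dicts have different key types);
-- index[j].setdefault(v, set()).add(name) is exactly Dict.modify v ∅ (Set.add · name)
def altIndex : PySem.Dict Bool (PySem.Set String) × PySem.Dict Bool (PySem.Set String)
    × PySem.Dict String (PySem.Set String) × PySem.Dict String (PySem.Set String) :=
  altTable.foldl (fun ix t =>
    (ix.1.modify t.2.1 PySem.Set.empty (fun s => PySem.Set.add s t.1),
     ix.2.1.modify t.2.2.1 PySem.Set.empty (fun s => PySem.Set.add s t.1),
     ix.2.2.1.modify t.2.2.2.1 PySem.Set.empty (fun s => PySem.Set.add s t.1),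
     ix.2.2.2.modify t.2.2.2.2 PySem.Set.empty (fun s => PySem.Set.add s t.1)))
    (PySem.Dict.empty, PySem.Dict.empty, PySem.Dict.empty, PySem.Dict.empty)

-- the `for j, want in enumerate((is_input, is_output, content_type, length_type))` loop,
-- unrolled into its four iterations (the four filters have different types); the final
-- sorted(hits, key=_pos.__getitem__) sorts by table position — every hit is a table name,
-- so the lookup never misses and the getD default is never used; the key is injective on
-- the hits, so the result does not depend on the set's iteration order
def build_file_type_choice_list_alt (is_input : Option Bool) (is_output : Option Bool) (content_type : Option String) (length_type : Option String) : List String :=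
  let hits0 : PySem.Set String := PySem.Set.ofList altPos.keys
  let hits1 := match is_input with
    | none => hits0
    | some w => PySem.Set.inter hits0 ((altIndex.1.get? w).getD PySem.Set.empty)
  let hits2 := match is_output with
    | none => hits1
    | some w => PySem.Set.inter hits1 ((altIndex.2.1.get? w).getD PySem.Set.empty)
  let hits3 := match content_type with
    | none => hits2
    | some w => PySem.Set.inter hits2 ((altIndex.2.2.1.get? w).getD PySem.Set.empty)
  let hits4 := match length_type with
    | none => hits3
    | some w => PySem.Set.inter hits3 ((altIndex.2.2.2.get? w).getD PySem.Set.empty)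
  PySem.List.sorted hits4 (fun n => altPos.getD n 0) false

-- ===== PRECONDITION & SPEC =====
def Spec_build_file_type_choice_list (is_input : Option Bool) (is_output : Option Bool) (content_type : Option String) (length_type : Option String) (out : List String) : Prop := out = build_file_type_choice_list_alt is_input is_output content_type length_type
instance (is_input : Option Bool) (is_output : Option Bool) (content_type : Option String) (length_type : Option String) (out : List String) : Decidable (Spec_build_file_type_choice_list is_input is_output content_type length_type out) := by unfold Spec_build_file_type_choice_list; infer_instance

-- ===== CLAIM (what is proved, stated in full; the proofs are below) =====
def Claim_equal_build_file_type_choice_list : Prop := ∀ (is_input : Option Bool) (is_output : Option Bool) (content_type : Option String) (length_type : Option String), Dom_build_file_type_choice_list is_input is_output content_type length_type → Spec_build_file_type_choice_list is_input is_output content_type length_type (build_file_type_choice_list is_input is_output content_type length_type)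

-- ===== LEMMAS AND PROOFS =====

-- find_in_list resolution of each alias target (evaluation on the concrete tables)
theorem pvA0row : (PySem.List.pyGet? pyFormats (objToIdx (pyAt (find_in_list (pyAt [PyObj.S "gba", PyObj.S "snes"] 1) pyFormats) 0))).getD [] = [PyObj.S "snes", PyObj.B true, PyObj.B true, PyObj.I 2, PyObj.S "raw", PyObj.S "variable", PyObj.S "little"] := by rfl
theorem pvA1row : (PySem.List.pyGet? pyFormats (objToIdx (pyAt (find_in_list (pyAt [PyObj.S "gbc", PyObj.S "snes"] 1) pyFormats) 0))).getD [] = [PyObj.S "snes", PyObj.B true, PyObj.B true, PyObj.I 2, PyObj.S "raw", PyObj.S "variable", PyObj.S "little"] := by rfl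
theorem pvA2row : (PySem.List.pyGet? pyFormats (objToIdx (pyAt (find_in_list (pyAt [PyObj.S "md", PyObj.S "gen"] 1) pyFormats) 0))).getD [] = [PyObj.S "gen", PyObj.B true, PyObj.B true, PyObj.I 2, PyObj.S "raw", PyObj.S "variable", PyObj.S "big"] := by rfl
theorem pvA3row : (PySem.List.pyGet? pyFormats (objToIdx (pyAt (find_in_list (pyAt [PyObj.S "psx", PyObj.S "snes"] 1) pyFormats) 0))).getD [] = [PyObj.S "snes", PyObj.B true, PyObj.B true, PyObj.I 2, PyObj.S "raw", PyObj.S "variable", PyObj.S "little"] := by rfl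
theorem pvA4row : (PySem.List.pyGet? pyFormats (objToIdx (pyAt (find_in_list (pyAt [PyObj.S "rgb24", PyObj.S "act"] 1) pyFormats) 0))).getD [] = [PyObj.S "act", PyObj.B true, PyObj.B true, PyObj.I 3, PyObj.S "raw", PyObj.S "fixed", PyObj.S "big"] := by rfl

theorem inter_nil (X : PySem.Set String) : PySem.Set.inter X [] = [] := by simp [PySem.Set.inter]

-- the length-type and content-type inverted indexes, evaluated to dict literals
set_option maxRecDepth 40000 in
theorem idxLT_eval : altIndex.2.2.2 = ⟨[("variable", ["32x", "gen", "gg", "gpl", "jasc", "png24", "rgb15", "rgb18", "sms", "snes", "wsc", "gba", "gbc", "md", "psx"]), ("fixed", ["act", "amp", "bmp24", "col", "gs0", "pdn", "png8", "riff", "tpl15", "tpl24", "zst", "rgb24"])]⟩ := by rfl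

set_option maxRecDepth 40000 in
theorem idxCT_eval : altIndex.2.2.1 = ⟨[("raw", ["32x", "act", "amp", "gen", "gg", "gs0", "rgb15", "rgb18", "sms", "snes", "wsc", "zst", "gba", "gbc", "md", "psx", "rgb24"]), ("image", ["bmp24", "png8", "png24"]), ("headered-raw", ["col", "riff", "tpl15", "tpl24"]), ("text", ["gpl", "jasc", "pdn"])]⟩ := by rfl

theorem getLT_none (t : String) (h1 : t ≠ "fixed") (h2 : t ≠ "variable") :
    (altIndex.2.2.2).get? t = none := by
  rw [idxLT_eval]; simp [PySem.Dict.get?, Ne.symm h1, Ne.symm h2]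

theorem getCT_none (s : String) (h1 : s ≠ "raw") (h2 : s ≠ "image") (h3 : s ≠ "headered-raw") (h4 : s ≠ "text") :
    (altIndex.2.2.1).get? s = none := by
  rw [idxCT_eval]; simp [PySem.Dict.get?, Ne.symm h1, Ne.symm h2, Ne.symm h3, Ne.symm h4]

-- a content_type string that names no content type: A filters every row away, B's index
-- lookup yields the empty set — both return []
theorem ct_other (ii : Option Bool) (io : Option Bool) (lt : Option String) (s : String)
    (h1 : s ≠ "raw") (h2 : s ≠ "image") (h3 : s ≠ "headered-raw") (h4 : s ≠ "text") :
    build_file_type_choice_list ii io (some s) lt = []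
      ∧ build_file_type_choice_list_alt ii io (some s) lt = [] := by
  constructor
  · unfold build_file_type_choice_list
    simp only [pyAliases, List.foldl_cons, List.foldl_nil, pvA0row, pvA1row, pvA2row, pvA3row, pvA4row]
    simp [pyFormats, skipS, pyAt, Ne.symm h1, Ne.symm h2, Ne.symm h3, Ne.symm h4,
      PySem.List.pyGet?, PySem.List.pyIdx?]
  · simp only [build_file_type_choice_list_alt]
    rw [getCT_none s h1 h2 h3 h4]
    rcases lt with _ | t
    · simp [inter_nil, PySem.List.sorted]
    · simp [PySem.Set.inter, PySem.List.sorted]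

-- a length_type string that names no length type: same picture, for any content_type
theorem lt_other (ii : Option Bool) (io : Option Bool) (ct : Option String) (t : String)
    (h1 : t ≠ "fixed") (h2 : t ≠ "variable") :
    build_file_type_choice_list ii io ct (some t) = []
      ∧ build_file_type_choice_list_alt ii io ct (some t) = [] := by
  constructor
  · unfold build_file_type_choice_list
    simp only [pyAliases, List.foldl_cons, List.foldl_nil, pvA0row, pvA1row, pvA2row, pvA3row, pvA4row]
    simp [pyFormats, skipS, pyAt, Ne.symm h1, Ne.symm h2, PySem.List.pyGet?, PySem.List.pyIdx?]
  · simp only [build_file_type_choice_list_alt]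
    rw [getLT_none t h1 h2]
    simp [inter_nil, PySem.List.sorted]

-- ===== VERDICT (by name: the statement is the Claim_ definition above) =====
set_option maxRecDepth 40000 in
set_option maxHeartbeats 4000000 in
theorem build_file_type_choice_list_spec : Claim_equal_build_file_type_choice_list := by
  intro ii io ct lt _
  unfold Spec_build_file_type_choice_list
  rcases ct with _ | s
  · rcases lt with _ | t
    · rcases ii with _ | (_ | _) <;> rcases io with _ | (_ | _) <;> decide
    · by_cases hf : t = "fixed"
      · subst hf; rcases ii with _ | (_ | _) <;> rcases io with _ | (_ | _) <;> decide
      by_cases hv : t = "variable"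
      · subst hv; rcases ii with _ | (_ | _) <;> rcases io with _ | (_ | _) <;> decide
      · have h := lt_other ii io none t hf hv
        rw [h.1, h.2]
  · by_cases c1 : s = "raw"
    case pos =>
      subst c1
      rcases lt with _ | t
      · rcases ii with _ | (_ | _) <;> rcases io with _ | (_ | _) <;> decide
      · by_cases hf : t = "fixed"
        · subst hf; rcases ii with _ | (_ | _) <;> rcases io with _ | (_ | _) <;> decide
        by_cases hv : t = "variable"
        · subst hv; rcases ii with _ | (_ | _) <;> rcases io with _ | (_ | _) <;> decide
        · have h := lt_other ii io (some "raw") t hf hv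
          rw [h.1, h.2]
    case neg =>
    by_cases c2 : s = "image"
    case pos =>
      subst c2
      rcases lt with _ | t
      · rcases ii with _ | (_ | _) <;> rcases io with _ | (_ | _) <;> decide
      · by_cases hf : t = "fixed"
        · subst hf; rcases ii with _ | (_ | _) <;> rcases io with _ | (_ | _) <;> decide
        by_cases hv : t = "variable"
        · subst hv; rcases ii with _ | (_ | _) <;> rcases io with _ | (_ | _) <;> decide
        · have h := lt_other ii io (some "image") t hf hv
          rw [h.1, h.2]
    case neg =>
    by_cases c3 : s = "headered-raw"
    case pos =>
      subst c3
      rcases lt with _ | t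
      · rcases ii with _ | (_ | _) <;> rcases io with _ | (_ | _) <;> decide
      · by_cases hf : t = "fixed"
        · subst hf; rcases ii with _ | (_ | _) <;> rcases io with _ | (_ | _) <;> decide
        by_cases hv : t = "variable"
        · subst hv; rcases ii with _ | (_ | _) <;> rcases io with _ | (_ | _) <;> decide
        · have h := lt_other ii io (some "headered-raw") t hf hv
          rw [h.1, h.2]
    case neg =>
    by_cases c4 : s = "text"
    case pos =>
      subst c4
      rcases lt with _ | t
      · rcases ii with _ | (_ | _) <;> rcases io with _ | (_ | _) <;> decide
      · by_cases hf : t = "fixed"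
        · subst hf; rcases ii with _ | (_ | _) <;> rcases io with _ | (_ | _) <;> decide
        by_cases hv : t = "variable"
        · subst hv; rcases ii with _ | (_ | _) <;> rcases io with _ | (_ | _) <;> decide
        · have h := lt_other ii io (some "text") t hf hv
          rw [h.1, h.2]
    case neg =>
      have h := ct_other ii io lt s c1 c2 c3 c4
      rw [h.1, h.2]
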